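-- pv_equiv track=rewrite | github.com/JunseoMin/RoadToDiamond | Python3/프로그래머스/2/17686. ［3차］ 파일명 정렬/［3차］ 파일명 정렬.py | solution
-- ===== SOURCE A (Python) =====
-- import heapq
-- from collections import defaultdict
--
-- def solution(files):
--     answer = []
--     numbers = "0123456789"
--     names = []
--     tags = defaultdict(int)
--
--     for idx, file in enumerate(files):
--         HEAD = ""
--         NUMBER = ""
--         TAIL = ""
--
--         j = 0
--         for i in range(len(file)):
--             if file[i] in numbers:
--                 j = i
--                 break
--             HEAD += file[i]
--
--         for i in range(j, len(file)):
--             if file[i] not in numbers: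
--                 j = i
--                 break
--             NUMBER += file[i]
--         else:
--             j = len(file)
--
--         TAIL = file[j:]
--         tag = HEAD.lower() + NUMBER
--         tags[tag] += 1
--
--         heapq.heappush(names, (HEAD.lower(), int(NUMBER), idx, HEAD, NUMBER, TAIL))
--
--     while names:
--         _, _, _, HEAD, NUMBER, TAIL = heapq.heappop(names)
--         answer.append(HEAD + NUMBER + TAIL)
--
--     return answer
-- ===== SOURCE B (Python) =====
-- def solution(files):
--     def sort_key(f):
--         i = next((p for p, c in enumerate(f) if c.isdigit()), len(f))
--         j = next((p for p in range(i, len(f)) if not f[p].isdigit()), len(f))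
--         return (f[:i].lower(), int(f[i:j]))
--     return sorted(files, key=sort_key)
-- ===== Notes on version B (the rewrite author's own statement) =====
-- stated objective: simpler
-- what changed: Replaces the heap of explicit (lower-head, number, idx, HEAD, NUMBER, TAIL) 6-tuples, the dead tags dict and the pop-and-reconstruct loop with a single stable sorted() over the original strings keyed by (head.lower(), int(number)), relying on sort stability for the original-index tiebreak.
import Mathlib
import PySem

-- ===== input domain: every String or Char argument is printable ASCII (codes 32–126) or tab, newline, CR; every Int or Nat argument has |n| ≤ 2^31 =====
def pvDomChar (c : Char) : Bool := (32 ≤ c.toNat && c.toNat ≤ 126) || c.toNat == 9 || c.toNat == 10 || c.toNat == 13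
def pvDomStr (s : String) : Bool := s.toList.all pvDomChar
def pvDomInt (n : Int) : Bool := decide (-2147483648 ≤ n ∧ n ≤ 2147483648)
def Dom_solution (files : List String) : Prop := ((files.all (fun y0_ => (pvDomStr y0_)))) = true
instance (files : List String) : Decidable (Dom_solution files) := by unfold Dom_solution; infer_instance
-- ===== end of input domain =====

-- B replaces A's explicit heap of (lower-head, number, idx, HEAD, NUMBER, TAIL) 6-tuples, the dead
-- tags dict and the pop-and-reconstruct loop by one stable sorted() keyed by (head.lower(), int(number)).

-- ===== PORT A =====

-- the tuple heappush'ed by A: (HEAD.lower(), int(NUMBER), idx, HEAD, NUMBER, TAIL)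
abbrev PvTup : Type := String × Int × Int × String × String × String

-- Python compares these tuples with '<' = lexicographic by components; the nested Prod.Lex order on
-- the components is exactly that (Lean's String '<' is code-point lexicographic, like Python's).
def pvKey6 (t : PvTup) : String ×ₗ Int ×ₗ Int ×ₗ String ×ₗ String ×ₗ String :=
  toLex (t.1, toLex (t.2.1, toLex (t.2.2.1, toLex (t.2.2.2.1, toLex (t.2.2.2.2.1, t.2.2.2.2.2)))))

-- heapq.heappush/heappop ported as a merge-based (skew) min-heap over the same '<'.  Exact on the
-- popped VALUE sequence: every correct min-heap pops, at each step, a minimum of the stored multiset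
-- under the total tuple order, so the sequence of popped values is the ascending ordering of the
-- pushed multiset — identical to CPython's array heap.
inductive PvHeap : Type
  | nil : PvHeap
  | node : PvTup → PvHeap → PvHeap → PvHeap

def PvHeap.size : PvHeap → Nat
  | .nil => 0
  | .node _ a b => a.size + b.size + 1

-- structural recursion on a fuel counter; fuel = h₁.size + h₂.size always suffices (each step
-- consumes one node), so the fuel-0 fallback is never reached on the calls the port makes
def PvHeap.merge (fuel : Nat) : PvHeap → PvHeap → PvHeap
  | .nil, h => h
  | h, .nil => h
  | .node x a b, .node y c d =>
    match fuel with
    | 0 => .nil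
    | fuel + 1 =>
      if pvKey6 y < pvKey6 x then .node y c (PvHeap.merge fuel (.node x a b) d)
      else .node x a (PvHeap.merge fuel b (.node y c d))

def PvHeap.push (h : PvHeap) (t : PvTup) : PvHeap := PvHeap.merge (h.size + 1) h (.node t .nil .nil)

-- 'for i in range(len(file)): if file[i] in numbers: j = i; break \n HEAD += file[i]'
-- returns (HEAD, some break-index), or (HEAD, none) when the loop never breaks (j keeps its initial 0)
def pvHeadLoop (cs : List Char) (i : Nat) : List Char × Option Nat :=
  match cs with
  | [] => ([], none)
  | c :: rest =>
    if ("0123456789".toList).contains c then ([], some i)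
    else
      let r := pvHeadLoop rest (i + 1)
      (c :: r.1, r.2)

-- 'for i in range(j, len(file)): if file[i] not in numbers: j = i; break \n NUMBER += file[i]
--  else: j = len(file)'   — cs is file[j:], i the running absolute index (= j at entry)
def pvNumLoop (cs : List Char) (i : Nat) : List Char × Nat :=
  match cs with
  | [] => ([], i)
  | c :: rest =>
    if !(("0123456789".toList).contains c) then ([], i)
    else
      let r := pvNumLoop rest (i + 1)
      (c :: r.1, r.2)

-- one iteration of A's parsing loop body, producing the pushed tuple
def pvMkTup (f : String) (idx : Int) : PvTup :=
  let cs := f.toList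
  let r1 := pvHeadLoop cs 0
  let HEAD := r1.1
  let j := r1.2.getD 0
  let r2 := pvNumLoop (cs.drop j) j          -- range(j, len(file)) reads file[j:], indices from j
  let NUMBER := r2.1
  let j2 := r2.2
  let TAIL := cs.drop j2                     -- file[j:] with 0 ≤ j2 ≤ len: the slice is List.drop
  (String.ofList (PySem.Chars.lower HEAD), (PySem.Int.ofChars? NUMBER).getD 0, idx,
   String.ofList HEAD, String.ofList NUMBER, String.ofList TAIL)
  -- int(NUMBER) raises ValueError iff NUMBER = "" (no digit in f); those inputs are outside Pre_

-- 'while names: _, _, _, HEAD, NUMBER, TAIL = heappop(names); answer.append(HEAD+NUMBER+TAIL)'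
-- (fuel = number of pops left = heap size at the call site)
def pvPopLoop (fuel : Nat) (h : PvHeap) : List String :=
  match fuel, h with
  | _, .nil => []
  | 0, _ => []
  | fuel + 1, .node t a b =>
    (t.2.2.2.1 ++ t.2.2.2.2.1 ++ t.2.2.2.2.2) :: pvPopLoop fuel (PvHeap.merge (a.size + b.size) a b)

def solution (files : List String) : List String :=
  -- for idx, file in enumerate(files): …  (state: the heap 'names' and the dead 'tags' defaultdict)
  let st := (files.zipIdx).foldl
    (fun (st : PvHeap × PySem.Dict String Int) fi =>
      let t := pvMkTup fi.1 (fi.2 : Int)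
      let tag := t.1 ++ t.2.2.2.2.1                    -- HEAD.lower() + NUMBER
      (st.1.push t, st.2.modify tag 0 (· + 1)))        -- tags[tag] += 1 (defaultdict(int))
    (PvHeap.nil, PySem.Dict.empty)
  pvPopLoop st.1.size st.1

-- ===== PORT B =====

-- Source B: sorted(files, key=sort_key) with sort_key f = (f[:i].lower(), int(f[i:j])), i = index of the
-- first digit (len if none), j = end of that digit run; f[:i] is the non-digit prefix (takeWhile),
-- f[i:j] the digit run after it.  Char.isDigit = Python str.isdigit on the ASCII domain.
def solution_alt (files : List String) : List String :=
  PySem.List.sorted2 files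
    (fun f => String.ofList (PySem.Chars.lower (f.toList.takeWhile (fun c => !c.isDigit))))
    (fun f => (PySem.Int.ofChars? ((f.toList.dropWhile (fun c => !c.isDigit)).takeWhile (fun c => c.isDigit))).getD 0)
  -- int("") raises ValueError iff f has no digit; those inputs are outside Pre_ (A raises there too)

-- ===== PRECONDITION & SPEC =====

-- Pre_ excludes exactly the inputs where A (and B) raise ValueError: a file with no decimal digit
-- (including "") makes int('') fail in both programs.
def Pre_solution (files : List String) : Prop :=
  ∀ f ∈ files, (f.toList.any (fun c => c.isDigit)) = true
instance (files : List String) : Decidable (Pre_solution files) := by unfold Pre_solution; infer_instance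

def pvWitness_solution : List String := ["img12.png", "img10.png", "IMG2.JPG", "F-5 x", "0"]

def Spec_solution (files : List String) (out : List String) : Prop := out = solution_alt files
instance (files : List String) (out : List String) : Decidable (Spec_solution files out) := by unfold Spec_solution; infer_instance

-- ===== CLAIM (what is proved, stated in full; the proofs are below) =====
def Claim_equal_solution : Prop := ∀ (files : List String), Dom_solution files → Pre_solution files → Spec_solution files (solution files)

-- ===== LEMMAS AND PROOFS =====

-- 'c in "0123456789"' is Char.isDigit
theorem pv_contains_digits (c : Char) : ("0123456789".toList).contains c = c.isDigit := by
  have h : "0123456789".toList = ['0','1','2','3','4','5','6','7','8','9'] := rfl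
  rw [h]
  simp only [List.contains_cons, List.contains_nil, Bool.or_false]
  rw [Bool.eq_iff_iff]
  simp only [Bool.or_eq_true, beq_iff_eq, Char.isDigit, decide_eq_true_eq, Bool.and_eq_true]
  constructor
  · rintro (h|h|h|h|h|h|h|h|h|h) <;> subst h <;> exact ⟨by decide, by decide⟩
  · rintro ⟨h1, h2⟩
    have h1' : 48 ≤ c.val.toNat := h1
    have h2' : c.val.toNat ≤ 57 := h2
    have hc : ∀ n : UInt32, c.val = n ↔ c.val.toNat = n.toNat := fun n =>
      ⟨fun h => by rw [h], fun h => UInt32.toNat_inj.mp h⟩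
    simp only [Char.ext_iff, hc, show ('0':Char).val.toNat = 48 from rfl,
      show ('1':Char).val.toNat = 49 from rfl, show ('2':Char).val.toNat = 50 from rfl,
      show ('3':Char).val.toNat = 51 from rfl, show ('4':Char).val.toNat = 52 from rfl,
      show ('5':Char).val.toNat = 53 from rfl, show ('6':Char).val.toNat = 54 from rfl,
      show ('7':Char).val.toNat = 55 from rfl, show ('8':Char).val.toNat = 56 from rfl,
      show ('9':Char).val.toNat = 57 from rfl]
    omega

theorem pv_dropWhile_eq_drop (p : Char → Bool) (cs : List Char) :
    cs.drop (cs.takeWhile p).length = cs.dropWhile p := by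
  induction cs with
  | nil => rfl
  | cons c rest ih => by_cases h : p c <;> simp [h, ih]

-- ---- parsing loop characterisation ----

theorem pvHeadLoop_spec (cs : List Char) (h : cs.any Char.isDigit = true) : ∀ i : Nat,
    pvHeadLoop cs i = (cs.takeWhile (fun c => !c.isDigit),
      some (i + (cs.takeWhile (fun c => !c.isDigit)).length)) := by
  induction cs with
  | nil => simp at h
  | cons c rest ih =>
    intro i
    rw [pvHeadLoop]
    rw [pv_contains_digits]
    by_cases hc : c.isDigit
    · simp [hc]
    · have hrest : rest.any Char.isDigit = true := by
        simp [List.any_cons, hc] at h; simpa using h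
      simp [hc, ih hrest]
      omega

theorem pvNumLoop_spec (cs : List Char) : ∀ i : Nat,
    pvNumLoop cs i = (cs.takeWhile (fun c => c.isDigit),
      i + (cs.takeWhile (fun c => c.isDigit)).length) := by
  induction cs with
  | nil => intro i; simp [pvNumLoop]
  | cons c rest ih =>
    intro i
    rw [pvNumLoop]
    rw [pv_contains_digits]
    by_cases hc : c.isDigit
    · simp [hc, ih]
      omega
    · simp [hc]

-- B's key functions, named
def pvK1 (f : String) : String :=
  String.ofList (PySem.Chars.lower (f.toList.takeWhile (fun c => !c.isDigit)))
def pvK2 (f : String) : Int :=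
  (PySem.Int.ofChars? ((f.toList.dropWhile (fun c => !c.isDigit)).takeWhile (fun c => c.isDigit))).getD 0

-- what A's per-file parse produces, in takeWhile/dropWhile form
theorem pvMkTup_spec (f : String) (idx : Int) (h : f.toList.any Char.isDigit = true) :
    pvMkTup f idx =
      (pvK1 f, pvK2 f, idx,
       String.ofList (f.toList.takeWhile (fun c => !c.isDigit)),
       String.ofList ((f.toList.dropWhile (fun c => !c.isDigit)).takeWhile (fun c => c.isDigit)),
       String.ofList ((f.toList.dropWhile (fun c => !c.isDigit)).dropWhile (fun c => c.isDigit))) := by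
  unfold pvMkTup pvK1 pvK2
  simp only [pvHeadLoop_spec f.toList h 0, pvNumLoop_spec, Option.getD_some, Nat.zero_add,
    pv_dropWhile_eq_drop]
  have hdrop2 : f.toList.drop ((f.toList.takeWhile (fun c => !c.isDigit)).length +
      ((f.toList.dropWhile (fun c => !c.isDigit)).takeWhile (fun c => c.isDigit)).length)
      = (f.toList.dropWhile (fun c => !c.isDigit)).dropWhile (fun c => c.isDigit) := by
    rw [← List.drop_drop, pv_dropWhile_eq_drop, pv_dropWhile_eq_drop]
  simp [hdrop2]

-- HEAD + NUMBER + TAIL is the original file name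
theorem pv_recon (f : String) :
    String.ofList (f.toList.takeWhile (fun c => !c.isDigit)) ++
    String.ofList ((f.toList.dropWhile (fun c => !c.isDigit)).takeWhile (fun c => c.isDigit)) ++
    String.ofList ((f.toList.dropWhile (fun c => !c.isDigit)).dropWhile (fun c => c.isDigit)) = f := by
  rw [← String.ofList_append, ← String.ofList_append, List.append_assoc,
    List.takeWhile_append_dropWhile, List.takeWhile_append_dropWhile, String.ofList_toList]

-- ---- heap lemmas ----

def pvHeapToList : PvHeap → List PvTup
  | .nil => []
  | .node t a b => t :: (pvHeapToList a ++ pvHeapToList b)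

def PvHeap.IsHeap : PvHeap → Prop
  | .nil => True
  | .node x a b => (∀ y ∈ pvHeapToList a, pvKey6 x ≤ pvKey6 y) ∧ (∀ y ∈ pvHeapToList b, pvKey6 x ≤ pvKey6 y) ∧
      a.IsHeap ∧ b.IsHeap

theorem pv_shuffle (w u v : List PvTup) (y : PvTup) :
    (y :: (u ++ (w ++ v))).Perm (w ++ y :: (u ++ v)) :=
  (List.Perm.cons y (List.perm_append_comm_assoc u w v)).trans List.perm_middle.symm

theorem pv_size_merge : ∀ (fuel : Nat) (a b : PvHeap), a.size + b.size ≤ fuel →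
    (PvHeap.merge fuel a b).size = a.size + b.size := by
  intro fuel
  induction fuel with
  | zero =>
    intro a b h
    cases a with
    | nil => simp [PvHeap.merge, PvHeap.size]
    | node x l r =>
      cases b with
      | nil => simp [PvHeap.merge, PvHeap.size]
      | node y c d => simp [PvHeap.size] at h
  | succ n ih =>
    intro a b h
    cases a with
    | nil => simp [PvHeap.merge, PvHeap.size]
    | node x l r =>
      cases b with
      | nil => simp [PvHeap.merge, PvHeap.size]
      | node y c d =>
        simp only [PvHeap.size] at h
        rw [PvHeap.merge]
        by_cases hlt : pvKey6 y < pvKey6 x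
        · rw [if_pos hlt]
          have := ih (PvHeap.node x l r) d (by simp [PvHeap.size]; omega)
          simp only [PvHeap.size] at this ⊢
          omega
        · rw [if_neg hlt]
          have := ih r (PvHeap.node y c d) (by simp [PvHeap.size]; omega)
          simp only [PvHeap.size] at this ⊢
          omega

theorem pv_toList_merge_perm : ∀ (fuel : Nat) (a b : PvHeap), a.size + b.size ≤ fuel →
    (pvHeapToList (PvHeap.merge fuel a b)).Perm (pvHeapToList a ++ pvHeapToList b) := by
  intro fuel
  induction fuel with
  | zero =>
    intro a b h
    cases a with
    | nil => simp [PvHeap.merge, pvHeapToList]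
    | node x l r =>
      cases b with
      | nil => simp [PvHeap.merge, pvHeapToList]
      | node y c d => simp [PvHeap.size] at h
  | succ n ih =>
    intro a b h
    cases a with
    | nil => simp [PvHeap.merge, pvHeapToList]
    | node x l r =>
      cases b with
      | nil => simp [PvHeap.merge, pvHeapToList]
      | node y c d =>
        simp only [PvHeap.size] at h
        rw [PvHeap.merge]
        by_cases hlt : pvKey6 y < pvKey6 x
        · rw [if_pos hlt]
          have := ih (PvHeap.node x l r) d (by simp [PvHeap.size]; omega)
          simp only [pvHeapToList] at this ⊢
          exact (List.Perm.cons y (List.Perm.append_left (pvHeapToList c) this)).trans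
            (pv_shuffle (x :: (pvHeapToList l ++ pvHeapToList r)) (pvHeapToList c) (pvHeapToList d) y)
        · rw [if_neg hlt]
          have := ih r (PvHeap.node y c d) (by simp [PvHeap.size]; omega)
          simp only [pvHeapToList] at this ⊢
          simpa [List.append_assoc] using (List.Perm.cons x (List.Perm.append_left (pvHeapToList l) this))

theorem pv_mem_node (z x : PvTup) (a b : PvHeap)
    (hxa : ∀ y ∈ pvHeapToList a, pvKey6 x ≤ pvKey6 y) (hxb : ∀ y ∈ pvHeapToList b, pvKey6 x ≤ pvKey6 y)
    (hz : z ∈ pvHeapToList (PvHeap.node x a b)) : pvKey6 x ≤ pvKey6 z := by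
  simp only [pvHeapToList, List.mem_cons, List.mem_append] at hz
  rcases hz with rfl | hz | hz
  · exact le_refl _
  · exact hxa z hz
  · exact hxb z hz

theorem pv_isHeap_merge : ∀ (fuel : Nat) (a b : PvHeap), a.size + b.size ≤ fuel →
    a.IsHeap → b.IsHeap → (PvHeap.merge fuel a b).IsHeap := by
  intro fuel
  induction fuel with
  | zero =>
    intro a b h ha hb
    cases a with
    | nil => simpa [PvHeap.merge]
    | node x l r =>
      cases b with
      | nil => simpa [PvHeap.merge]
      | node y c d => simp [PvHeap.size] at h
  | succ n ih =>
    intro a b h ha hb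
    cases a with
    | nil => simpa [PvHeap.merge]
    | node x l r =>
      cases b with
      | nil => simpa [PvHeap.merge]
      | node y c d =>
        simp only [PvHeap.size] at h
        rw [PvHeap.merge]
        by_cases hlt : pvKey6 y < pvKey6 x
        · rw [if_pos hlt]
          obtain ⟨hya, hyb, hca, hcb⟩ := hb
          rw [PvHeap.IsHeap]
          refine ⟨hya, ?_, hca, ih _ _ (by simp [PvHeap.size]; omega) ha hcb⟩
          intro z hz
          have hz' := (pv_toList_merge_perm n (PvHeap.node x l r) d
            (by simp [PvHeap.size]; omega)).mem_iff.mp hz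
          rcases List.mem_append.mp hz' with hz'' | hz''
          · obtain ⟨hxa, hxb, _, _⟩ := ha
            exact le_trans (le_of_lt hlt) (pv_mem_node z x l r hxa hxb hz'')
          · exact hyb z hz''
        · rw [if_neg hlt]
          obtain ⟨hxa, hxb, haa, hab⟩ := ha
          rw [PvHeap.IsHeap]
          refine ⟨hxa, ?_, haa, ih _ _ (by simp [PvHeap.size]; omega) hab hb⟩
          intro z hz
          have hz' := (pv_toList_merge_perm n r (PvHeap.node y c d)
            (by simp [PvHeap.size]; omega)).mem_iff.mp hz
          rcases List.mem_append.mp hz' with hz'' | hz''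
          · exact hxb z hz''
          · obtain ⟨hya, hyb, _, _⟩ := hb
            exact le_trans (le_of_not_gt hlt) (pv_mem_node z y c d hya hyb hz'')

-- the sequence of popped tuples, same fuel discipline as pvPopLoop
def pvPopAll (fuel : Nat) (h : PvHeap) : List PvTup :=
  match fuel, h with
  | _, .nil => []
  | 0, _ => []
  | fuel + 1, .node t a b => t :: pvPopAll fuel (PvHeap.merge (a.size + b.size) a b)

theorem pvPopLoop_eq : ∀ (fuel : Nat) (h : PvHeap), h.size ≤ fuel →
    pvPopLoop fuel h = (pvPopAll fuel h).map (fun t => t.2.2.2.1 ++ t.2.2.2.2.1 ++ t.2.2.2.2.2) := by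
  intro fuel
  induction fuel with
  | zero =>
    intro h hle
    cases h with
    | nil => simp [pvPopLoop, pvPopAll]
    | node t a b => simp [PvHeap.size] at hle
  | succ n ih =>
    intro h hle
    cases h with
    | nil => simp [pvPopLoop, pvPopAll]
    | node t a b =>
      simp only [PvHeap.size] at hle
      rw [pvPopLoop, pvPopAll, List.map_cons]
      rw [ih _ (by rw [pv_size_merge _ _ _ (le_refl _)]; omega)]

theorem pvPopAll_perm : ∀ (fuel : Nat) (h : PvHeap), h.size ≤ fuel →
    (pvPopAll fuel h).Perm (pvHeapToList h) := by
  intro fuel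
  induction fuel with
  | zero =>
    intro h hle
    cases h with
    | nil => simp [pvPopAll, pvHeapToList]
    | node t a b => simp [PvHeap.size] at hle
  | succ n ih =>
    intro h hle
    cases h with
    | nil => simp [pvPopAll, pvHeapToList]
    | node t a b =>
      simp only [PvHeap.size] at hle
      rw [pvPopAll, pvHeapToList]
      have hfe : a.size + b.size ≤ n := by omega
      have h1 := ih _ (by rw [pv_size_merge _ _ _ (le_refl _)]; omega)
      exact List.Perm.cons _ (h1.trans (pv_toList_merge_perm _ a b (le_refl _)))

theorem pvPopAll_pairwise : ∀ (fuel : Nat) (h : PvHeap), h.size ≤ fuel → h.IsHeap →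
    (pvPopAll fuel h).Pairwise (fun s t => pvKey6 s ≤ pvKey6 t) := by
  intro fuel
  induction fuel with
  | zero =>
    intro h hle _
    cases h with
    | nil => simp [pvPopAll]
    | node t a b => simp [PvHeap.size] at hle
  | succ n ih =>
    intro h hle hh
    cases h with
    | nil => simp [pvPopAll]
    | node t a b =>
      obtain ⟨hta, htb, haa, hbb⟩ := hh
      simp only [PvHeap.size] at hle
      rw [pvPopAll]
      refine List.Pairwise.cons ?_
        (ih _ (by rw [pv_size_merge _ _ _ (le_refl _)]; omega)
          (pv_isHeap_merge _ a b (le_refl _) haa hbb))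
      intro z hz
      have hz' := ((pvPopAll_perm _ _ (by rw [pv_size_merge _ _ _ (le_refl _)]; omega)).trans
        (pv_toList_merge_perm _ a b (le_refl _))).mem_iff.mp hz
      rcases List.mem_append.mp hz' with hz'' | hz''
      · exact hta z hz''
      · exact htb z hz''

-- ---- B's stable sort, reformulated as a sort of the index-decorated list ----

def pvKeyD (p : String × Nat) : String ×ₗ Int ×ₗ Nat := toLex (pvK1 p.1, toLex (pvK2 p.1, p.2))

def pvLtB (a b : String) : Bool :=
  decide (pvK1 a < pvK1 b) || (!decide (pvK1 b < pvK1 a) && decide (pvK2 a < pvK2 b))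

theorem pvLtD_eq (x y : String) (n j : Nat) (hj : j < n) :
    decide (pvKeyD (x, n) < pvKeyD (y, j)) = pvLtB x y := by
  unfold pvLtB pvKeyD
  rw [Bool.eq_iff_iff]
  simp only [Prod.Lex.lt_iff, ofLex_toLex, decide_eq_true_eq, Bool.or_eq_true, Bool.and_eq_true,
    Bool.not_eq_true', decide_eq_false_iff_not]
  constructor
  · rintro (h1 | ⟨h1, h2 | ⟨h2, h3⟩⟩)
    · exact Or.inl h1
    · exact Or.inr ⟨by simp [h1], h2⟩
    · omega
  · rintro (h1 | ⟨h1, h2⟩)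
    · exact Or.inl h1
    · rcases lt_trichotomy (pvK1 x) (pvK1 y) with h | h | h
      · exact Or.inl h
      · exact Or.inr ⟨h, Or.inl h2⟩
      · exact absurd h h1

theorem pv_insertBy_fst (x : String) (n : Nat) (acc : List (String × Nat))
    (hb : ∀ p ∈ acc, p.2 < n) :
    (PySem.List.insertBy (fun a b => decide (pvKeyD a < pvKeyD b)) (x, n) acc).map Prod.fst
      = PySem.List.insertBy pvLtB x (acc.map Prod.fst) := by
  induction acc with
  | nil => simp [PySem.List.insertBy]
  | cons p rest ih =>
    have hp : p.2 < n := hb p (List.mem_cons_self)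
    have hcond : decide (pvKeyD (x, n) < pvKeyD p) = pvLtB x p.1 := by
      have := pvLtD_eq x p.1 n p.2 hp
      simpa using this
    have hL : PySem.List.insertBy (fun a b => decide (pvKeyD a < pvKeyD b)) (x, n) (p :: rest)
        = if decide (pvKeyD (x, n) < pvKeyD p) then (x, n) :: p :: rest
          else p :: PySem.List.insertBy (fun a b => decide (pvKeyD a < pvKeyD b)) (x, n) rest := rfl
    have hR : PySem.List.insertBy pvLtB x (p.1 :: rest.map Prod.fst)
        = if pvLtB x p.1 then x :: p.1 :: rest.map Prod.fst
          else p.1 :: PySem.List.insertBy pvLtB x (rest.map Prod.fst) := rfl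
    rw [List.map_cons, hL, hR, hcond]
    by_cases h : pvLtB x p.1
    · simp [h]
    · simp only [h, if_false, Bool.false_eq_true, List.map_cons]
      rw [ih (fun q hq => hb q (List.mem_cons_of_mem _ hq))]

theorem pv_foldl_decor (xs : List String) : ∀ (n : Nat) (acc : List (String × Nat)),
    (∀ p ∈ acc, p.2 < n) →
    ((xs.zipIdx n).foldl
        (fun acc q => PySem.List.insertBy (fun a b => decide (pvKeyD a < pvKeyD b)) q acc)
        acc).map Prod.fst
      = xs.foldl (fun acc x => PySem.List.insertBy pvLtB x acc) (acc.map Prod.fst) := by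
  induction xs with
  | nil => intro n acc _; simp
  | cons x rest ih =>
    intro n acc hb
    rw [List.zipIdx_cons, List.foldl_cons, List.foldl_cons, ← pv_insertBy_fst x n acc hb]
    refine ih (n + 1) _ ?_
    intro q hq
    rcases (PySem.List.mem_insertBy _ _ _ _).mp hq with rfl | hq'
    · omega
    · exact Nat.lt_succ_of_lt (hb q hq')

theorem pv_alt_eq (files : List String) :
    solution_alt files = (PySem.List.sorted (files.zipIdx) pvKeyD).map Prod.fst := by
  rw [PySem.List.sorted_eq_foldl_insertBy, pv_foldl_decor files 0 [] (by simp), List.map_nil]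
  rfl

-- ---- assembly ----

def pvKey3 (t : PvTup) : String ×ₗ Int ×ₗ Int := toLex (t.1, toLex (t.2.1, t.2.2.1))

theorem pv_key3_lt (s t : PvTup) (h6 : pvKey6 s ≤ pvKey6 t) (hne : s.2.2.1 ≠ t.2.2.1) :
    pvKey3 s < pvKey3 t := by
  unfold pvKey6 at h6
  unfold pvKey3
  simp only [Prod.Lex.le_iff, Prod.Lex.lt_iff, ofLex_toLex] at h6 ⊢
  rcases h6 with h | ⟨h1, h | ⟨h2, h | ⟨h3, _⟩⟩⟩
  · exact Or.inl h
  · exact Or.inr ⟨h1, Or.inl h⟩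
  · exact Or.inr ⟨h1, Or.inr ⟨h2, h⟩⟩
  · exact absurd h3 hne

-- decoration of a popped tuple: (HEAD+NUMBER+TAIL, idx)
def pvG (t : PvTup) : String × Nat := (t.2.2.2.1 ++ t.2.2.2.2.1 ++ t.2.2.2.2.2, t.2.2.1.toNat)

theorem pvG_mkTup (f : String) (n : Nat) (h : f.toList.any Char.isDigit = true) :
    pvG (pvMkTup f (n : Int)) = (f, n) := by
  rw [pvMkTup_spec f _ h]
  unfold pvG
  simp [pv_recon]

theorem pv_keyD_lt (f g : String) (n m : Nat)
    (hdf : f.toList.any Char.isDigit = true) (hdg : g.toList.any Char.isDigit = true)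
    (h : pvKey3 (pvMkTup f (n : Int)) < pvKey3 (pvMkTup g (m : Int))) :
    pvKeyD (pvG (pvMkTup f (n : Int))) < pvKeyD (pvG (pvMkTup g (m : Int))) := by
  rw [pvG_mkTup f n hdf, pvG_mkTup g m hdg]
  rw [pvMkTup_spec f _ hdf, pvMkTup_spec g _ hdg] at h
  unfold pvKey3 at h
  unfold pvKeyD
  simp only [Prod.Lex.lt_iff, ofLex_toLex] at h ⊢
  rcases h with h | ⟨h1, h | ⟨h2, h⟩⟩
  · exact Or.inl h
  · exact Or.inr ⟨h1, Or.inl h⟩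
  · exact Or.inr ⟨h1, Or.inr ⟨h2, by exact_mod_cast h⟩⟩

-- A's loop body (tags dict and all), and A as a fold of it
def pvStep (st : PvHeap × PySem.Dict String Int) (fi : String × Nat) :
    PvHeap × PySem.Dict String Int :=
  let t := pvMkTup fi.1 (fi.2 : Int)
  let tag := t.1 ++ t.2.2.2.2.1
  (st.1.push t, st.2.modify tag 0 (· + 1))

theorem pv_solution_eq (files : List String) :
    solution files =
      pvPopLoop ((files.zipIdx.foldl pvStep (PvHeap.nil, PySem.Dict.empty)).1).size
        ((files.zipIdx.foldl pvStep (PvHeap.nil, PySem.Dict.empty)).1) := rfl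

theorem pv_build (ps : List (String × Nat)) : ∀ (st : PvHeap × PySem.Dict String Int),
    st.1.IsHeap →
    ((ps.foldl pvStep st).1.IsHeap ∧
      (pvHeapToList (ps.foldl pvStep st).1).Perm
        (pvHeapToList st.1 ++ ps.map (fun p => pvMkTup p.1 (p.2 : Int)))) := by
  induction ps with
  | nil => intro st h; exact ⟨h, by simp⟩
  | cons p rest ih =>
    intro st h
    rw [List.foldl_cons]
    have hsing : (PvHeap.node (pvMkTup p.1 (p.2 : Int)) .nil .nil).IsHeap := by
      refine ⟨?_, ?_, trivial, trivial⟩ <;> simp [pvHeapToList]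
    have hpush : ((pvStep st p).1).IsHeap :=
      pv_isHeap_merge _ _ _ (by simp [PvHeap.size]) h hsing
    obtain ⟨h1, h2⟩ := ih (pvStep st p) hpush
    refine ⟨h1, h2.trans ?_⟩
    have hm : (pvHeapToList (pvStep st p).1).Perm (pvHeapToList st.1 ++ [pvMkTup p.1 (p.2 : Int)]) := by
      simpa [pvHeapToList] using
        pv_toList_merge_perm (st.1.size + 1) st.1 (PvHeap.node (pvMkTup p.1 (p.2 : Int)) .nil .nil)
          (by simp [PvHeap.size])
    refine (hm.append_right _).trans ?_
    simp [List.append_assoc]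

-- ===== VERDICT (by name: the statement is the Claim_ definition above) =====
theorem solution_spec : Claim_equal_solution := by
  intro files _ hpre
  show solution files = solution_alt files
  obtain ⟨hH, hperm⟩ := pv_build files.zipIdx (PvHeap.nil, PySem.Dict.empty) trivial
  set H := ((files.zipIdx.foldl pvStep (PvHeap.nil, PySem.Dict.empty)).1) with hHdef
  have hpop_perm : (pvPopAll H.size H).Perm
      (files.zipIdx.map (fun p => pvMkTup p.1 (p.2 : Int))) :=
    (pvPopAll_perm H.size H (le_refl _)).trans (by simpa [pvHeapToList] using hperm)
  have hshape : ∀ s ∈ pvPopAll H.size H, ∃ (f : String) (n : Nat), f ∈ files ∧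
      f.toList.any Char.isDigit = true ∧ s = pvMkTup f (n : Int) := by
    intro s hs
    obtain ⟨⟨f, n⟩, hp, rfl⟩ := List.mem_map.mp (hpop_perm.mem_iff.mp hs)
    obtain ⟨-, hlt, heq⟩ := List.mem_zipIdx hp
    have hf : f ∈ files := by rw [heq]; exact List.getElem_mem _
    exact ⟨f, n, hf, hpre f hf, rfl⟩
  have hpair6 := pvPopAll_pairwise H.size H (le_refl _) hH
  have hidx : (pvPopAll H.size H).Pairwise (fun s t => s.2.2.1 ≠ t.2.2.1) := by
    rw [List.Perm.pairwise_iff (fun h => Ne.symm h) hpop_perm]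
    rw [List.pairwise_map]
    have hz : (files.zipIdx).Pairwise (fun p q => p.2 < q.2) := by
      rw [← List.pairwise_map (f := Prod.snd) (R := (· < ·)), List.zipIdx_map_snd]
      exact List.pairwise_lt_range' 1
    refine hz.imp ?_
    intro p q hpq
    show (pvMkTup p.1 (p.2 : Int)).2.2.1 ≠ (pvMkTup q.1 (q.2 : Int)).2.2.1
    have h1 : (pvMkTup p.1 (p.2 : Int)).2.2.1 = (p.2 : Int) := rfl
    have h2 : (pvMkTup q.1 (q.2 : Int)).2.2.1 = (q.2 : Int) := rfl
    rw [h1, h2]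
    exact_mod_cast Nat.ne_of_lt hpq
  have hpair3 : (pvPopAll H.size H).Pairwise (fun s t => pvKey3 s < pvKey3 t) :=
    (hpair6.and hidx).imp (fun h => pv_key3_lt _ _ h.1 h.2)
  have hysperm : ((pvPopAll H.size H).map pvG).Perm files.zipIdx := by
    refine (hpop_perm.map pvG).trans (List.Perm.of_eq ?_)
    rw [List.map_map]
    refine List.map_congr_left ?_ |>.trans (List.map_id _)
    intro p hp
    obtain ⟨f, n⟩ := p
    obtain ⟨-, hlt, heq⟩ := List.mem_zipIdx hp
    have hf : f ∈ files := by rw [heq]; exact List.getElem_mem _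
    simpa using pvG_mkTup f n (hpre f hf)
  have hpairD : ((pvPopAll H.size H).map pvG).Pairwise (fun p q => pvKeyD p < pvKeyD q) := by
    rw [List.pairwise_map]
    refine hpair3.imp_of_mem ?_
    intro s t hs ht h3
    obtain ⟨f, n, hf, hdf, rfl⟩ := hshape s hs
    obtain ⟨g, m, hg, hdg, rfl⟩ := hshape t ht
    exact pv_keyD_lt f g n m hdf hdg h3
  have hsorted : PySem.List.sorted (files.zipIdx) pvKeyD = (pvPopAll H.size H).map pvG :=
    PySem.List.sorted_eq_of_perm_of_pairwise_lt _ _ pvKeyD hysperm hpairD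
  calc solution files
      = pvPopLoop H.size H := pv_solution_eq files
    _ = (pvPopAll H.size H).map (fun t => t.2.2.2.1 ++ t.2.2.2.2.1 ++ t.2.2.2.2.2) :=
        pvPopLoop_eq H.size H (le_refl _)
    _ = ((pvPopAll H.size H).map pvG).map Prod.fst := by rw [List.map_map]; rfl
    _ = (PySem.List.sorted (files.zipIdx) pvKeyD).map Prod.fst := by rw [hsorted]
    _ = solution_alt files := (pv_alt_eq files).symm
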